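-- pv_equiv track=rewrite | github.com/chris45724/Kris-Stuff | PythonProjects/Test.py | hmm
-- ===== SOURCE A (Python) =====
-- def hmm(num,cycles):
--
--     num = int(num)
--     cycles = int(cycles)
--
--     hold = num
--
--     numList = list()
--     numList.append(num)
--
--     for x in range(cycles):
--         num = num + hold
--         numList.append(num)
--
--     return numList
-- ===== SOURCE B (Python) =====
-- def hmm(num, cycles):
--     num = int(num)
--     cycles = int(cycles)
--     return [num * (k + 1) for k in range(max(cycles, 0) + 1)]
-- ===== Notes on version B (the rewrite author's own statement) =====
-- stated objective: simpler
-- what changed: Replaces the running-sum accumulator loop (append first, then add `hold` each iteration) with a closed-form comprehension computing each element independently as num*(k+1) over range(max(cycles,0)+1).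
import Mathlib
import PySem

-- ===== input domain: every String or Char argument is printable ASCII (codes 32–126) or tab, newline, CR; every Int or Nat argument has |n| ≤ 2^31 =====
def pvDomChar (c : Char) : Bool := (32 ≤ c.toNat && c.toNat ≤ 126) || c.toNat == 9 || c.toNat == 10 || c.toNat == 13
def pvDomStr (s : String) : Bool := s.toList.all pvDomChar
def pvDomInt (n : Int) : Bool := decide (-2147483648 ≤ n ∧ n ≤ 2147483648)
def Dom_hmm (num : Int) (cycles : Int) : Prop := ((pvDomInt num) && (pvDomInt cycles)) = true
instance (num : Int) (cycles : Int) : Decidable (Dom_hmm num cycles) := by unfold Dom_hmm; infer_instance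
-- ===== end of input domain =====

-- B replaces A's running-sum accumulator loop by a closed-form per-index multiplication (simpler).

-- ===== PORT A =====
-- A: hold = num; numList = [num]; for x in range(cycles): num += hold; numList.append(num)
def hmm (num : Int) (cycles : Int) : List Int :=
  let hold := num
  ((PySem.List.pyRange 0 cycles 1).foldl
    (fun (st : Int × List Int) _ => (st.1 + hold, st.2 ++ [st.1 + hold]))
    (num, [num])).2

-- ===== PORT B =====
-- B: [num * (k + 1) for k in range(max(cycles, 0) + 1)]
def hmm_alt (num : Int) (cycles : Int) : List Int :=
  (PySem.List.pyRange 0 (max cycles 0 + 1) 1).map (fun k => num * (k + 1))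

-- ===== PRECONDITION & SPEC =====
def Spec_hmm (num : Int) (cycles : Int) (out : List Int) : Prop := out = hmm_alt num cycles
instance (num : Int) (cycles : Int) (out : List Int) : Decidable (Spec_hmm num cycles out) := by unfold Spec_hmm; infer_instance

-- ===== CLAIM (what is proved, stated in full; the proofs are below) =====
def Claim_equal_hmm : Prop := ∀ (num : Int) (cycles : Int), Dom_hmm num cycles → Spec_hmm num cycles (hmm num cycles)

-- ===== LEMMAS AND PROOFS =====

-- loop invariant: after n iterations the accumulator is num*(n+1) and the list is the first n+1 multiples
theorem hmm_fold_key (num : Int) (n : Nat) :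
    ((PySem.List.pyRange 0 (n : Int) 1).foldl
      (fun (st : Int × List Int) _ => (st.1 + num, st.2 ++ [st.1 + num]))
      (num, [num]))
    = (num * ((n : Int) + 1),
       (PySem.List.pyRange 0 ((n : Int) + 1) 1).map (fun k => num * (k + 1))) := by
  induction n with
  | zero =>
      rw [show ((0 : Nat) : Int) = 0 by norm_num,
          PySem.List.pyRange_one_eq_nil (le_refl 0),
          PySem.List.pyRange_one_singleton]
      simp
  | succ n ih =>
      have h1 : ((n + 1 : Nat) : Int) = (n : Int) + 1 := by push_cast; ring
      rw [h1, PySem.List.pyRange_one_succ_right (by positivity : (0 : Int) ≤ (n : Int)),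
          List.foldl_append, ih,
          PySem.List.pyRange_one_succ_right (by positivity : (0 : Int) ≤ (n : Int) + 1),
          List.map_append]
      simp only [List.foldl_cons, List.foldl_nil, List.map_cons, List.map_nil, Prod.mk.injEq]
      constructor <;> ring

-- ===== VERDICT (by name: the statement is the Claim_ definition above) =====
theorem hmm_spec : Claim_equal_hmm := by
  intro num cycles _
  unfold Spec_hmm hmm hmm_alt
  show ((PySem.List.pyRange 0 cycles 1).foldl
      (fun (st : Int × List Int) _ => (st.1 + num, st.2 ++ [st.1 + num]))
      (num, [num])).2
    = (PySem.List.pyRange 0 (max cycles 0 + 1) 1).map (fun k => num * (k + 1))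
  by_cases h : cycles ≤ 0
  · rw [PySem.List.pyRange_one_eq_nil h, max_eq_right h,
        PySem.List.pyRange_one_singleton]
    simp
  · have hc : cycles = ((cycles.toNat : Nat) : Int) := by omega
    rw [max_eq_left (by omega : (0 : Int) ≤ cycles), hc, hmm_fold_key]
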